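-- pv_equiv track=rewrite | github.com/whitegreyblack/Spaceship | spaceship/ecs/map.py | create_empty_room
-- ===== SOURCE A (Python) =====
-- def create_empty_room(width: int, height: int):
--     room = []
--     for h in range(height):
--         if h in (0, height - 1):
--             room.append('#' * width)
--         else:
--             room.append('#' + '.' * (width - 2) + '#')
--     return '\n'.join(room)
-- ===== SOURCE B (Python) =====
-- def create_empty_room(width: int, height: int):
--     def cell(r, c):
--         if r == 0 or r == height - 1 or c == 0 or c == width - 1:
--             return '#'
--         return '.'
--     return '\n'.join(
--         ''.join(cell(r, c) for c in range(width))
--         for r in range(height)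
--     )
-- ===== Notes on version B (the rewrite author's own statement) =====
-- stated objective: alternative
-- what changed: B computes each cell of the grid independently from a border predicate on its (row, column) coordinates (a 2D per-cell rule) instead of A's assembly of precomputed row strings chosen by a per-row membership test.
-- intended difference: For width < 2 and height >= 3, A's interior rows are the two-character string '##' (wider than the room, an artifact of '#'+'.'*(width-2)+'#'), while B returns rows of the room's actual width ('#' for width 1, '' for width <= 0), which is the intended shape of a width-consistent room. — e.g. on create_empty_room(1, 3): A returns "#\n##\n#", B returns "#\n#\n#"
import Mathlib
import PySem

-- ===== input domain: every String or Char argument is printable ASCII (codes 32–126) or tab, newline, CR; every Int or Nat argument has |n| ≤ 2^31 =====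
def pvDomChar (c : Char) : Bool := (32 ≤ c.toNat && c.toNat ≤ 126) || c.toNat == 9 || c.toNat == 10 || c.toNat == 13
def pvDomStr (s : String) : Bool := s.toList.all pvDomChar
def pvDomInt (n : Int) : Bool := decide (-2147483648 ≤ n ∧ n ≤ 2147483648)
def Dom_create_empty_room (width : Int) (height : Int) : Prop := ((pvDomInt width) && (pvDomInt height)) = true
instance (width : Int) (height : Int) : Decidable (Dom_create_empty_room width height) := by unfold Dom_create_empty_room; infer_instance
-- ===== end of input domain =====

-- B computes each cell from a border predicate on its (row, column) coordinates instead of assembling precomputed row strings; on width < 2 with height >= 3 (D_) B returns width-consistent rows where A's interior rows are '##'.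


-- ===== PORT A =====
def create_empty_room (width : Int) (height : Int) : String :=
  let room : List String :=
    (PySem.List.pyRange 0 height 1).foldl (fun room h =>
      room ++ [if h = 0 ∨ h = height - 1 then
                 String.ofList (PySem.List.pyRepeat ['#'] width)
               else
                 String.ofList (['#'] ++ PySem.List.pyRepeat ['.'] (width - 2) ++ ['#'])]) []
  PySem.Str.join "\n" room

-- ===== PORT B =====
-- per-cell rule: '#' on the border of the grid, '.' inside
def pvCell (width : Int) (height : Int) (r : Int) (c : Int) : Char :=
  if r = 0 ∨ r = height - 1 ∨ c = 0 ∨ c = width - 1 then '#' else '.'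

def create_empty_room_alt (width : Int) (height : Int) : String :=
  PySem.Str.join "\n" ((PySem.List.pyRange 0 height 1).map (fun r =>
    String.ofList ((PySem.List.pyRange 0 width 1).map (fun c => pvCell width height r c))))

-- ===== PRECONDITION & SPEC =====
-- For width < 2 and height >= 3, A's interior rows are '##' (wider than the room), while B returns
-- rows of the room's actual width ('#' for width 1, '' for width <= 0), the intended width-consistent shape.
def D_create_empty_room (width : Int) (height : Int) : Prop := width < 2 ∧ 3 ≤ height
instance (width : Int) (height : Int) : Decidable (D_create_empty_room width height) := by unfold D_create_empty_room; infer_instance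
def Spec_create_empty_room (width : Int) (height : Int) (out : String) : Prop := ¬ D_create_empty_room width height → out = create_empty_room_alt width height
instance (width : Int) (height : Int) (out : String) : Decidable (Spec_create_empty_room width height out) := by unfold Spec_create_empty_room; infer_instance
def pvDiffWitness_create_empty_room : Int × Int := (1, 3)
def pvDiffWitnessOut_create_empty_room : String × String := ("#\n##\n#", "#\n#\n#")

-- ===== CLAIM (what is proved, stated in full; the proofs are below) =====
def Claim_unchanged_create_empty_room : Prop := ∀ (width : Int) (height : Int), Dom_create_empty_room width height → Spec_create_empty_room width height (create_empty_room width height)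
def Claim_changed_create_empty_room : Prop := Dom_create_empty_room (pvDiffWitness_create_empty_room.1) (pvDiffWitness_create_empty_room.2) ∧ D_create_empty_room (pvDiffWitness_create_empty_room.1) (pvDiffWitness_create_empty_room.2) ∧ create_empty_room (pvDiffWitness_create_empty_room.1) (pvDiffWitness_create_empty_room.2) = pvDiffWitnessOut_create_empty_room.1 ∧ create_empty_room_alt (pvDiffWitness_create_empty_room.1) (pvDiffWitness_create_empty_room.2) = pvDiffWitnessOut_create_empty_room.2 ∧ pvDiffWitnessOut_create_empty_room.1 ≠ pvDiffWitnessOut_create_empty_room.2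
def Claim_exact_create_empty_room : Prop := ∀ (width : Int) (height : Int), Dom_create_empty_room width height → D_create_empty_room width height → create_empty_room width height ≠ create_empty_room_alt width height

-- ===== LEMMAS AND PROOFS =====

-- a border row of B's grid is the wall row '#' * width
theorem brow_wall (width height r : Int) (hr : r = 0 ∨ r = height - 1) :
    (PySem.List.pyRange 0 width 1).map (fun c => pvCell width height r c) =
      PySem.List.pyRepeat ['#'] width := by
  rw [PySem.List.pyRepeat_singleton,
      List.map_congr_left (g := fun _ => '#') (fun c _ => by simp [pvCell, hr.imp id (fun h => Or.inl h)])]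
  · simp [List.map_const', PySem.List.length_pyRange_one]

-- an interior row of B's grid, for width ≥ 2, is '#' ++ '.' * (width-2) ++ '#'
theorem brow_mid (width height r : Int) (hw : 2 ≤ width)
    (hr0 : r ≠ 0) (hr1 : r ≠ height - 1) :
    (PySem.List.pyRange 0 width 1).map (fun c => pvCell width height r c) =
      ['#'] ++ PySem.List.pyRepeat ['.'] (width - 2) ++ ['#'] := by
  rw [PySem.List.pyRange_one_cons (by omega : (0:Int) < width)]
  rw [show (0:Int) + 1 = 1 by norm_num]
  rw [PySem.List.pyRange_one_append 1 (width - 1) width (by omega) (by omega),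
      PySem.List.pyRange_one_cons (by omega : width - 1 < width),
      PySem.List.pyRange_one_eq_nil (by omega : width ≤ width - 1 + 1)]
  simp only [List.map_cons, List.map_append, List.map_nil]
  rw [List.map_congr_left (g := fun _ => '.')
      (fun c hc => by
        rw [PySem.List.mem_pyRange_one] at hc
        simp [pvCell, hr0, hr1, show c ≠ 0 by omega, show c ≠ width - 1 by omega])]
  simp only [List.map_const', PySem.List.length_pyRange_one, PySem.List.pyRepeat_singleton]
  have h1 : (width - 1 - 1).toNat = (width - 2).toNat := by omega
  simp [pvCell, hr0, hr1, show (0:Int) ≠ width - 1 by omega, h1]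

-- length of a joined list of char-lists
theorem join_len (sep : List Char) (css : List (List Char)) :
    (PySem.Chars.join sep css).length =
      (css.map List.length).sum + sep.length * (css.length - 1) := by
  induction css with
  | nil => simp [PySem.Chars.join_nil]
  | cons a rest ih =>
    cases rest with
    | nil => simp [PySem.Chars.join_singleton]
    | cons b t =>
      rw [PySem.Chars.join_cons_cons]
      simp only [List.length_append, List.map_cons, List.sum_cons, List.length_cons,
        Nat.add_sub_cancel] at ih ⊢
      rw [ih, Nat.mul_succ]
      omega

-- ===== VERDICT (by name: the statement is the Claim_ definition above) =====
theorem create_empty_room_spec : Claim_unchanged_create_empty_room := by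
  intro width height _ hnd
  unfold create_empty_room create_empty_room_alt
  rw [PySem.List.foldl_append_singleton_eq_map]
  simp only [List.nil_append]
  congr 1
  refine List.map_congr_left (fun r hr => ?_)
  rw [PySem.List.mem_pyRange_one] at hr
  by_cases hb : r = 0 ∨ r = height - 1
  · rw [brow_wall width height r hb, if_pos hb]
  · push Not at hb
    have hh3 : 3 ≤ height := by omega
    have hw : 2 ≤ width := by
      unfold D_create_empty_room at hnd; omega
    rw [brow_mid width height r hw hb.1 hb.2, if_neg (by tauto)]

theorem create_empty_room_changed : Claim_changed_create_empty_room := by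
  unfold Claim_changed_create_empty_room; decide

theorem create_empty_room_tight : Claim_exact_create_empty_room := by
  intro width height _ hd heq
  obtain ⟨hw, hh⟩ := hd
  have hlen := congrArg (fun s => s.toList.length) heq
  simp only at hlen
  unfold create_empty_room create_empty_room_alt at hlen
  rw [PySem.List.foldl_append_singleton_eq_map] at hlen
  simp only [List.nil_append, PySem.Str.toList_join] at hlen
  rw [join_len, join_len] at hlen
  have hdec : PySem.List.pyRange 0 height 1 =
      0 :: (PySem.List.pyRange 1 (height - 1) 1 ++ [height - 1]) := by
    rw [PySem.List.pyRange_one_cons (by omega : (0:Int) < height),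
        show (0:Int) + 1 = 1 by norm_num,
        PySem.List.pyRange_one_append 1 (height - 1) height (by omega) (by omega),
        PySem.List.pyRange_one_cons (by omega : height - 1 < height),
        PySem.List.pyRange_one_eq_nil (by omega : height ≤ height - 1 + 1)]
  rw [hdec] at hlen
  have hBrow : ∀ r : Int,
      (String.ofList (List.map (fun c => pvCell width height r c)
        (PySem.List.pyRange 0 width 1))).toList.length = width.toNat := by
    intro r; simp [PySem.List.length_pyRange_one]
  have hAmid : ∀ r ∈ PySem.List.pyRange 1 (height - 1) 1,
      (if r = 0 ∨ r = height - 1 then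
         String.ofList (PySem.List.pyRepeat ['#'] width)
       else
         String.ofList (['#'] ++ PySem.List.pyRepeat ['.'] (width - 2) ++ ['#'])).toList.length
        = 2 := by
    intro r hrm
    rw [PySem.List.mem_pyRange_one] at hrm
    simp [show ¬ (r = 0 ∨ r = height - 1) by omega,
          PySem.List.pyRepeat_singleton, show (width - 2).toNat = 0 by omega]
  simp only [List.map_cons, List.map_append, List.map_map, List.sum_cons, List.sum_append,
    List.length_cons, List.length_append, List.length_map, Function.comp_def,
    List.map_nil, List.sum_nil, List.length_nil] at hlen
  rw [List.map_congr_left hAmid] at hlen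
  simp only [hBrow, true_or, or_true, if_true,
    PySem.List.pyRepeat_singleton, PySem.List.length_pyRange_one,
    List.map_const', List.sum_replicate, smul_eq_mul] at hlen
  simp at hlen
  have hW : width.toNat = 0 ∨ width.toNat = 1 := by omega
  rcases hW with h0 | h1
  · rw [h0] at hlen; omega
  · rw [h1] at hlen; simp at hlen; omega
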